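-- pv_equiv track=rewrite | github.com/oleksiy-perepelytsya/bary-vector | lib/parse.py | _extract_ipa
-- ===== SOURCE A (Python) =====
-- from typing import Any
--
-- def _extract_ipa(sounds: list[dict[str, Any]]) -> str | None:
--     """First IPA entry without dialect tags; fall back to first IPA at all."""
--     first: str | None = None
--     for s in sounds:
--         ipa = s.get("ipa")
--         if not ipa:
--             continue
--         if first is None:
--             first = ipa
--         if not s.get("tags"):
--             return ipa
--     return first
-- ===== SOURCE B (Python) =====
-- def _extract_ipa(sounds):
--     """First IPA entry without dialect tags; fall back to first IPA at all."""
--     untagged = next(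
--         (s["ipa"] for s in sounds if s.get("ipa") and not s.get("tags")), None
--     )
--     if untagged is not None:
--         return untagged
--     return next((s["ipa"] for s in sounds if s.get("ipa")), None)
-- ===== Notes on version B (the rewrite author's own statement) =====
-- stated objective: simpler
-- what changed: Replaces the single interleaved loop tracking a 'first' fallback with two separate generator scans: first for an untagged IPA, then for any IPA.
import Mathlib
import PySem

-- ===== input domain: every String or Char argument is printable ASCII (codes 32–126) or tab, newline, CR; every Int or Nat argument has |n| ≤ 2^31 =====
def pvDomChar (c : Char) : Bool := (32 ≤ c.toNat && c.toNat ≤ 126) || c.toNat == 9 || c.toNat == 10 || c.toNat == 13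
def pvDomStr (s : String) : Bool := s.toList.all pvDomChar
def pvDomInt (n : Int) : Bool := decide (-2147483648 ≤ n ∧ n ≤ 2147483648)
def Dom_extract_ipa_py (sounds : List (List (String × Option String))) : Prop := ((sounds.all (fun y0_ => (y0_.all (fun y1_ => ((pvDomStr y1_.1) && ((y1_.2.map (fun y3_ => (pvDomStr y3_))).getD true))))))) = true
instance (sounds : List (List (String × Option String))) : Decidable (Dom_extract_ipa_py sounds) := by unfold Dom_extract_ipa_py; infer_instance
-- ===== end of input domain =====

-- B replaces A's single interleaved loop (tracking a 'first' fallback) with two separate scans; objective: simpler.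

-- ===== PORT A =====
-- dict.get(k): first match in the association list (none = key absent)
def pvDictGet (s : List (String × Option String)) (k : String) : Option (Option String) :=
  (s.find? (fun p => p.1 == k)).map (·.2)

-- Python truthiness of a dict.get result (absent, None and "" are falsy)
def pvTruthy (o : Option (Option String)) : Bool :=
  match o with
  | some (some v) => v ≠ ""
  | _ => false

-- the for-loop of A, with 'first' as accumulator
def extract_ipa_go (first : Option String) : List (List (String × Option String)) → Option String
  | [] => first
  | s :: rest =>
    match pvDictGet s "ipa" with
    | some (some v) =>
      if v = "" then extract_ipa_go first rest
      else
        let first' := if first.isNone then some v else first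
        if pvTruthy (pvDictGet s "tags") then extract_ipa_go first' rest else some v
    | _ => extract_ipa_go first rest

def extract_ipa_py (sounds : List (List (String × Option String))) : Option String :=
  extract_ipa_go none sounds

-- ===== PORT B =====
-- first truthy IPA of a sound without truthy tags
def pvUntagged (s : List (String × Option String)) : Option String :=
  match pvDictGet s "ipa" with
  | some (some v) => if v ≠ "" ∧ ¬ pvTruthy (pvDictGet s "tags") then some v else none
  | _ => none

-- any truthy IPA of a sound
def pvAnyIpa (s : List (String × Option String)) : Option String :=
  match pvDictGet s "ipa" with
  | some (some v) => if v ≠ "" then some v else none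
  | _ => none

def extract_ipa_py_alt (sounds : List (List (String × Option String))) : Option String :=
  match sounds.findSome? pvUntagged with
  | some v => some v
  | none => sounds.findSome? pvAnyIpa

-- ===== PRECONDITION & SPEC =====
def Spec_extract_ipa_py (sounds : List (List (String × Option String))) (out : Option String) : Prop := out = extract_ipa_py_alt sounds
instance (sounds : List (List (String × Option String))) (out : Option String) : Decidable (Spec_extract_ipa_py sounds out) := by unfold Spec_extract_ipa_py; infer_instance

-- ===== CLAIM (what is proved, stated in full; the proofs are below) =====
def Claim_equal_extract_ipa_py : Prop := ∀ (sounds : List (List (String × Option String))), Dom_extract_ipa_py sounds → Spec_extract_ipa_py sounds (extract_ipa_py sounds)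

-- ===== LEMMAS AND PROOFS =====

-- loop invariant: A's loop is B's second scan with fallback 'first', overridden by B's first scan
theorem extract_ipa_go_eq (sounds : List (List (String × Option String))) (first : Option String) :
    extract_ipa_go first sounds =
      match sounds.findSome? pvUntagged with
      | some v => some v
      | none => if first.isSome then first else sounds.findSome? pvAnyIpa := by
  induction sounds generalizing first with
  | nil => cases first <;> simp [extract_ipa_go]
  | cons s rest ih =>
    simp only [extract_ipa_go, List.findSome?_cons, pvUntagged, pvAnyIpa]
    cases h : pvDictGet s "ipa" with
    | none => simp [ih]
    | some o =>
      cases o with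
      | none => simp [ih]
      | some v =>
        by_cases hv : v = ""
        · simp [hv, ih]
        · by_cases ht : pvTruthy (pvDictGet s "tags") = true
          · simp only [hv, ht, if_true, ih]
            cases first <;> simp [hv]
          · simp [hv, ht]

-- ===== VERDICT (by name: the statement is the Claim_ definition above) =====
theorem extract_ipa_py_spec : Claim_equal_extract_ipa_py := by
  intro sounds _
  unfold Spec_extract_ipa_py extract_ipa_py extract_ipa_py_alt
  rw [extract_ipa_go_eq]
  cases sounds.findSome? pvUntagged <;> simp
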